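-- pv_equiv track=rewrite | github.com/JdanielGA/crud_app | test/registers.py | search_exact_by_id
-- ===== SOURCE A (Python) =====
-- def search_exact_by_id(registers, id_to_search):
--
--     filtered_list = []
--     idx = 0
--
--     for ref, organization in enumerate(registers):
--         if id_to_search == organization["ID Number"]:
--             filtered_list.append(organization)
--             idx = ref
--
--
--     if filtered_list:
--         client_dict = filtered_list
--         return client_dict, idx
--     else:
--         client_dict = None
--         idx = None
--         return client_dict, idx
-- ===== SOURCE B (Python) =====
-- def search_exact_by_id(registers, id_to_search):
--     matches = [org for org in registers if org["ID Number"] == id_to_search]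
--     if not matches:
--         return None, None
--     for i in range(len(registers) - 1, -1, -1):
--         if registers[i]["ID Number"] == id_to_search:
--             return matches, i
-- ===== Notes on version B (the rewrite author's own statement) =====
-- stated objective: simpler
-- what changed: Replaces A's single fused forward scan (accumulator list plus a mutable last-index variable) by two separate passes: a comprehension building the match list, then a reverse scan from the end that stops at the first (i.e. last) matching index.
import Mathlib
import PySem

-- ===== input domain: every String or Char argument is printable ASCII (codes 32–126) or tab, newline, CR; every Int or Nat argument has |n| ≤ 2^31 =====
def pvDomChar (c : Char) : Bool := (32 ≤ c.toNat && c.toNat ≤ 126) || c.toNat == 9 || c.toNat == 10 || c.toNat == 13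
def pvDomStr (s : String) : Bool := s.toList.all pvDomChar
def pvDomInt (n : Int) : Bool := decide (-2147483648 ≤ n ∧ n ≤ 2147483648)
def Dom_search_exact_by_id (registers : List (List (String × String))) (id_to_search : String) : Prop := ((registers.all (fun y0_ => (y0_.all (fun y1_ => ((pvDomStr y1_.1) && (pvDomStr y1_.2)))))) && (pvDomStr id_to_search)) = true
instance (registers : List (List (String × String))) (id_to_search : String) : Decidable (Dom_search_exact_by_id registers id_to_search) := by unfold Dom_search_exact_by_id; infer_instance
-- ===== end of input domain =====

-- B replaces A's single fused forward scan by two passes (a filter, then a reverse scan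
-- for the last matching index) — objective: simpler decomposition, same O(n) cost.

-- dict lookup org["ID Number"] (first match, per the dict-as-assoc-list convention);
-- none = KeyError, excluded by Pre_
def pvGetId (org : List (String × String)) : Option String :=
  PySem.Dict.get? (PySem.Dict.mk org) "ID Number"

-- ===== PORT A =====
-- the for-loop over enumerate(registers): ref is the running counter, acc/idx the two mutables
def pvALoop (id_to_search : String) :
    List (List (String × String)) → Int → List (List (String × String)) → Int →
    List (List (String × String)) × Int
  | [], _, acc, idx => (acc, idx)
  | org :: rest, ref, acc, idx =>
    if some id_to_search = pvGetId org then
      pvALoop id_to_search rest (ref + 1) (acc ++ [org]) ref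
    else
      pvALoop id_to_search rest (ref + 1) acc idx

def search_exact_by_id (registers : List (List (String × String))) (id_to_search : String) :
    (Option (List (List (String × String)))) × Option Int :=
  let r := pvALoop id_to_search registers 0 [] 0
  if r.1 ≠ [] then (some r.1, some r.2) else (none, none)

-- ===== PORT B =====
-- the reverse for-loop 'for i in range(len(registers)-1, -1, -1)': argument n = i + 1
def pvRevFind (registers : List (List (String × String))) (id_to_search : String) :
    Nat → Option Int
  | 0 => none
  | i + 1 =>
    if pvGetId (registers.getD i []) = some id_to_search then some (i : Int)
    else pvRevFind registers id_to_search i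

def search_exact_by_id_alt (registers : List (List (String × String))) (id_to_search : String) :
    (Option (List (List (String × String)))) × Option Int :=
  let ms := registers.filter (fun org => pvGetId org == some id_to_search)
  if ms = [] then (none, none)
  else (some ms, pvRevFind registers id_to_search registers.length)

-- ===== PRECONDITION & SPEC =====
-- Pre_ excludes exactly the inputs on which the Python raises KeyError: some register
-- lacks the key "ID Number" (then both A and B raise).
def Pre_search_exact_by_id (registers : List (List (String × String))) (id_to_search : String) : Prop :=
  registers.all (fun org => (PySem.Dict.mk org).contains "ID Number") = true
instance (registers : List (List (String × String))) (id_to_search : String) : Decidable (Pre_search_exact_by_id registers id_to_search) := by unfold Pre_search_exact_by_id; infer_instance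

def pvWitness_search_exact_by_id : (List (List (String × String))) × String :=
  ([[("ID Number", "1"), ("Name", "x")], [("ID Number", "2")]], "1")

def Spec_search_exact_by_id (registers : List (List (String × String))) (id_to_search : String) (out : (Option (List (List (String × String)))) × Option Int) : Prop := out = search_exact_by_id_alt registers id_to_search
instance (registers : List (List (String × String))) (id_to_search : String) (out : (Option (List (List (String × String)))) × Option Int) : Decidable (Spec_search_exact_by_id registers id_to_search out) := by unfold Spec_search_exact_by_id; infer_instance

-- ===== CLAIM (what is proved, stated in full; the proofs are below) =====
def Claim_equal_search_exact_by_id : Prop := ∀ (registers : List (List (String × String))) (id_to_search : String), Dom_search_exact_by_id registers id_to_search → Pre_search_exact_by_id registers id_to_search → Spec_search_exact_by_id registers id_to_search (search_exact_by_id registers id_to_search)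

-- ===== LEMMAS AND PROOFS =====

-- last matching index (from the front), the common specification of both loops
def pvLast (id_to_search : String) : List (List (String × String)) → Option Nat
  | [] => none
  | org :: rest =>
    match pvLast id_to_search rest with
    | some j => some (j + 1)
    | none => if some id_to_search = pvGetId org then some 0 else none

theorem pvALoop_spec (id : String) (regs : List (List (String × String))) :
    ∀ (ref : Int) (acc : List (List (String × String))) (idx : Int),
      pvALoop id regs ref acc idx =
        (acc ++ regs.filter (fun org => pvGetId org == some id),
         (pvLast id regs).elim idx (fun j => ref + (j : Int))) := by
  induction regs with
  | nil => intro ref acc idx; simp [pvALoop, pvLast]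
  | cons org rest ih =>
    intro ref acc idx
    by_cases h : pvGetId org = some id
    · have hb : (pvGetId org == some id) = true := by simp [h]
      rw [pvALoop, if_pos h.symm, ih]
      cases hL : pvLast id rest with
      | none => simp [pvLast, hL, h.symm, List.filter_cons, hb]
      | some j =>
        simp only [pvLast, hL, List.filter_cons, hb, if_true, Option.elim]
        rw [Prod.mk.injEq]
        refine ⟨by simp, by push_cast; ring⟩
    · have hb : (pvGetId org == some id) = false := by simp [h]
      rw [pvALoop, if_neg (Ne.symm h), ih]
      cases hL : pvLast id rest with
      | none => simp [pvLast, hL, List.filter_cons, hb, Ne.symm h]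
      | some j =>
        simp only [pvLast, hL, List.filter_cons, hb, Bool.false_eq_true,
          if_false, Option.elim]
        rw [Prod.mk.injEq]
        refine ⟨rfl, by push_cast; ring⟩

theorem pvLast_append_singleton (id : String) (xs : List (List (String × String)))
    (x : List (String × String)) :
    pvLast id (xs ++ [x]) =
      if some id = pvGetId x then some xs.length else pvLast id xs := by
  induction xs with
  | nil => simp [pvLast]
  | cons y ys ih =>
    simp only [List.cons_append, pvLast, ih]
    by_cases h : some id = pvGetId x
    · simp [h]
    · simp only [if_neg h]

theorem pvLast_none_iff (id : String) (regs : List (List (String × String))) :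
    pvLast id regs = none ↔ regs.filter (fun org => pvGetId org == some id) = [] := by
  induction regs with
  | nil => simp [pvLast]
  | cons org rest ih =>
    simp only [pvLast, List.filter_cons]
    by_cases h : pvGetId org = some id
    · have hb : (pvGetId org == some id) = true := by simp [h]
      simp only [hb, if_true]
      cases hL : pvLast id rest <;> simp [h.symm]
    · have hb : (pvGetId org == some id) = false := by simp [h]
      simp only [hb, Bool.false_eq_true, if_false]
      cases hL : pvLast id rest with
      | none => simpa [Ne.symm h, hL] using ih
      | some j => simpa [hL] using ih

theorem pvRevFind_spec (id : String) (regs : List (List (String × String))) :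
    ∀ n, n ≤ regs.length →
      pvRevFind regs id n = (pvLast id (regs.take n)).map (fun j => (j : Int)) := by
  intro n
  induction n with
  | zero => intro _; simp [pvRevFind, pvLast]
  | succ i ih =>
    intro hn
    have hi : i < regs.length := by omega
    have htake : regs.take (i + 1) = regs.take i ++ [regs[i]] := by
      rw [List.take_add_one]; simp [List.getElem?_eq_getElem hi]
    have hget : regs.getD i [] = regs[i] := by
      simp [List.getD, List.getElem?_eq_getElem hi]
    rw [pvRevFind, htake, pvLast_append_singleton, hget]
    by_cases h : pvGetId regs[i] = some id
    · rw [if_pos h, if_pos h.symm]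
      simp [List.length_take, Nat.min_eq_left (Nat.le_of_lt hi)]
    · rw [if_neg h, if_neg (Ne.symm h), ih (by omega)]

-- ===== VERDICT (by name: the statement is the Claim_ definition above) =====
theorem search_exact_by_id_spec : Claim_equal_search_exact_by_id := by
  intro regs id _ _
  show _ = _
  unfold search_exact_by_id search_exact_by_id_alt
  rw [pvALoop_spec]
  cases hL : pvLast id regs with
  | none =>
    have hf := (pvLast_none_iff id regs).mp hL
    simp [hf]
  | some j =>
    have hf : regs.filter (fun org => pvGetId org == some id) ≠ [] := by
      intro h
      rw [← pvLast_none_iff] at h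
      simp [hL] at h
    rw [pvRevFind_spec id regs regs.length (le_refl _), List.take_length]
    simp [hL, hf]
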